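-- pv_equiv track=rewrite | github.com/tezeladata/algorithmical | Second account/Codewars/6kyu.py | count_adjacent_pairs
-- ===== SOURCE A (Python) =====
-- def count_adjacent_pairs(st):
--     words = st.lower().split()
--     count = 0
--     i = 0
--     while i < len(words) - 1:
--         if words[i] == words[i + 1]:
--             count += 1
--             while i < len(words) - 1 and words[i] == words[i + 1]:
--                 i += 1
--         i += 1
--     return count
-- ===== SOURCE B (Python) =====
-- def count_adjacent_pairs(st):
--     # one forward pass with a run-length accumulator (no inner skip loop)
--     words = st.lower().split()
--     count = 0
--     runlen = 1
--     for prev, cur in zip(words, words[1:]):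
--         if cur == prev:
--             runlen += 1
--         else:
--             if runlen > 1:
--                 count += 1
--             runlen = 1
--     return count + (1 if runlen > 1 else 0)
-- ===== Notes on version B (the rewrite author's own statement) =====
-- stated objective: simpler
-- what changed: Replaces A's index-based outer while with a nested run-skipping inner while by a single forward pass over zipped adjacent word pairs that maintains a run-length counter and counts a run when it closes (plus a final flush).
import Mathlib
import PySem

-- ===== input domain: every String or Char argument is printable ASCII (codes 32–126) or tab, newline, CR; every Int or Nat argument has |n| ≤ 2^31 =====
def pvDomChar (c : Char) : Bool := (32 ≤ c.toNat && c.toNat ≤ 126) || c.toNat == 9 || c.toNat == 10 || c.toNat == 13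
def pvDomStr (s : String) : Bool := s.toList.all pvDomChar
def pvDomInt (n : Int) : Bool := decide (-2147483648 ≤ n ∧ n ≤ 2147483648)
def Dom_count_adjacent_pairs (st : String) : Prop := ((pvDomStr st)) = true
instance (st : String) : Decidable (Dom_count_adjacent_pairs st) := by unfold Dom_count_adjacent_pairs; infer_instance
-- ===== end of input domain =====

-- B replaces A's nested while loops (outer index scan + inner run-skipping while) by a
-- single pass over zipped adjacent word pairs with a run-length accumulator (objective: simpler).

-- ===== PORT A =====
-- inner while: 'while i < len(words) - 1 and words[i] == words[i + 1]: i += 1'; returns the final i.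
-- fuel (= len(words), enough for every entry point) only makes the recursion structural; it is never exhausted
def pvInner (w : List String) (fuel : Nat) (i : Nat) : Nat :=
  match fuel with
  | 0 => i
  | fuel + 1 =>
    if i < w.length - 1 ∧ w.getD i "" = w.getD (i + 1) "" then pvInner w fuel (i + 1) else i

-- outer while loop of A (same fuel discipline; i strictly increases each iteration)
def pvLoop (w : List String) (fuel : Nat) (i : Nat) (count : Int) : Int :=
  match fuel with
  | 0 => count
  | fuel + 1 =>
    if i < w.length - 1 then
      if w.getD i "" = w.getD (i + 1) "" then
        pvLoop w fuel (pvInner w w.length i + 1) (count + 1)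
      else
        pvLoop w fuel (i + 1) count
    else count

def count_adjacent_pairs (st : String) : Int :=
  let words := PySem.Str.split₀ (PySem.Str.lower st)
  pvLoop words words.length 0 0

-- ===== PORT B =====
-- B's loop body: state (count, runlen), one step per adjacent pair (prev, cur)
def pvStepB (s : Int × Int) (pc : String × String) : Int × Int :=
  if pc.2 = pc.1 then (s.1, s.2 + 1)
  else (s.1 + (if s.2 > 1 then 1 else 0), 1)

def count_adjacent_pairs_alt (st : String) : Int :=
  let words := PySem.Str.split₀ (PySem.Str.lower st)
  let s := (words.zip (PySem.List.slice words (some 1) none)).foldl pvStepB (0, 1)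
  s.1 + (if s.2 > 1 then 1 else 0)

-- ===== PRECONDITION & SPEC =====
def Spec_count_adjacent_pairs (st : String) (out : Int) : Prop := out = count_adjacent_pairs_alt st
instance (st : String) (out : Int) : Decidable (Spec_count_adjacent_pairs st out) := by unfold Spec_count_adjacent_pairs; infer_instance

-- ===== CLAIM (what is proved, stated in full; the proofs are below) =====
def Claim_equal_count_adjacent_pairs : Prop := ∀ (st : String), Dom_count_adjacent_pairs st → Spec_count_adjacent_pairs st (count_adjacent_pairs st)

-- ===== LEMMAS AND PROOFS =====

-- the suffix of the word list after A's inner while plus the final 'i += 1'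
def pvSkip : List String → List String
  | [] => []
  | [_] => []
  | x :: y :: t => if x = y then pvSkip (y :: t) else y :: t

theorem pvSkip_length_lt : ∀ (l : List String), l ≠ [] → (pvSkip l).length < l.length
  | [], h => absurd rfl h
  | [_], _ => by simp [pvSkip]
  | x :: y :: t, _ => by
    unfold pvSkip
    split
    · exact Nat.lt_trans (pvSkip_length_lt (y :: t) (by simp)) (by simp)
    · simp

-- number of maximal runs of length ≥ 2 (list-level reading of A's loop)
def pvN : List String → Int
  | [] => 0
  | [_] => 0
  | x :: y :: t =>
    if x = y then 1 + pvN (pvSkip (x :: y :: t)) else pvN (y :: t)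
termination_by l => l.length
decreasing_by
  · exact pvSkip_length_lt _ (by simp)
  · simp

theorem pvSkip_cons : ∀ (t : List String) (y : String), pvSkip (y :: t) = t.dropWhile (· = y)
  | [], y => by simp [pvSkip]
  | z :: t', y => by
    by_cases h : y = z
    · subst h
      simp [pvSkip, List.dropWhile, pvSkip_cons t' y]
    · simp [pvSkip, List.dropWhile, h, Ne.symm h]

theorem pvN_cons2 (x y : String) (t : List String) :
    pvN (x :: y :: t) = if x = y then 1 + pvN (pvSkip (x :: y :: t)) else pvN (y :: t) := by
  rw [pvN]

theorem pvN_short (l : List String) (h : l.length ≤ 1) : pvN l = 0 := by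
  match l with
  | [] => simp [pvN]
  | [_] => simp [pvN]
  | _ :: _ :: _ => simp at h

-- A's inner while, in list terms: the suffix after the skip-and-step
theorem pvInner_le (w : List String) : ∀ (fuel i : Nat), i ≤ pvInner w fuel i
  | 0, i => Nat.le_refl i
  | fuel + 1, i => by
    unfold pvInner
    split
    · exact Nat.le_of_succ_le (pvInner_le w fuel (i + 1))
    · exact Nat.le_refl i

theorem pvInner_drop (w : List String) : ∀ (fuel i : Nat), w.length ≤ i + fuel + 1 →
    w.drop (pvInner w fuel i + 1) = pvSkip (w.drop i)
  | 0, i, hf => by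
    have h1 : w.drop i = [] ∨ ∃ x, w.drop i = [x] := by
      have : (w.drop i).length ≤ 1 := by rw [List.length_drop]; omega
      match hd : w.drop i with
      | [] => exact Or.inl rfl
      | [x] => exact Or.inr ⟨x, rfl⟩
      | _ :: _ :: _ => rw [hd] at this; simp at this
    have h2 : w.drop (i + 1) = (w.drop i).tail := by
      rw [← List.drop_drop, List.drop_one]
    rcases h1 with h | ⟨x, h⟩ <;> simp [pvInner, h2, h, pvSkip]
  | fuel + 1, i, hf => by
    unfold pvInner
    split
    · rename_i h
      obtain ⟨hlt, heq⟩ := h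
      have hi : i < w.length := by omega
      have hi1 : i + 1 < w.length := by omega
      rw [pvInner_drop w fuel (i + 1) (by omega)]
      rw [List.drop_eq_getElem_cons hi, List.drop_eq_getElem_cons hi1]
      have e1 : w.getD i "" = w[i] := List.getD_eq_getElem w "" hi
      have e2 : w.getD (i + 1) "" = w[i + 1] := List.getD_eq_getElem w "" hi1
      rw [e1, e2] at heq
      simp [pvSkip, heq, ← List.drop_eq_getElem_cons hi1]
    · rename_i h
      by_cases hi : i < w.length
      · rw [List.drop_eq_getElem_cons hi]
        by_cases hi1 : i + 1 < w.length
        · rw [List.drop_eq_getElem_cons hi1]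
          have e1 : w.getD i "" = w[i] := List.getD_eq_getElem w "" hi
          have e2 : w.getD (i + 1) "" = w[i + 1] := List.getD_eq_getElem w "" hi1
          have hne : ¬ w[i] = w[i + 1] := by
            intro hc; exact h ⟨by omega, by rw [e1, e2]; exact hc⟩
          simp [pvSkip, hne, ← List.drop_eq_getElem_cons hi1]
        · have : w.drop (i + 1) = [] := List.drop_eq_nil_of_le (by omega)
          rw [this]; simp [pvSkip]
      · have h1 : w.drop i = [] := List.drop_eq_nil_of_le (by omega)
        have h2 : w.drop (i + 1) = [] := List.drop_eq_nil_of_le (by omega)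
        rw [h1, h2]; simp [pvSkip]

-- A's outer loop computes pvN of the remaining suffix
theorem pvLoop_eq (w : List String) : ∀ (fuel : Nat) (i : Nat) (c : Int), w.length ≤ i + fuel + 1 →
    pvLoop w fuel i c = c + pvN (w.drop i)
  | 0, i, c, hf => by
    have : (w.drop i).length ≤ 1 := by rw [List.length_drop]; omega
    rw [pvN_short _ this]; simp [pvLoop]
  | fuel + 1, i, c, hf => by
    unfold pvLoop
    split
    · rename_i hlt
      have hi : i < w.length := by omega
      have hi1 : i + 1 < w.length := by omega
      have e1 : w.getD i "" = w[i] := List.getD_eq_getElem w "" hi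
      have e2 : w.getD (i + 1) "" = w[i + 1] := List.getD_eq_getElem w "" hi1
      have hdrop : w.drop i = w[i] :: w[i + 1] :: w.drop (i + 2) := by
        rw [List.drop_eq_getElem_cons hi, List.drop_eq_getElem_cons hi1]
      split
      · rename_i heq
        rw [e1, e2] at heq
        have hile := pvInner_le w w.length i
        rw [pvLoop_eq w fuel (pvInner w w.length i + 1) (c + 1) (by omega)]
        rw [pvInner_drop w w.length i (by omega), hdrop, pvN_cons2, if_pos heq]
        ring
      · rename_i hne
        rw [e1, e2] at hne
        rw [pvLoop_eq w fuel (i + 1) c (by omega), hdrop, pvN_cons2, if_neg hne,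
          List.drop_eq_getElem_cons hi1]
    · rename_i h
      have : (w.drop i).length ≤ 1 := by
        rw [List.length_drop]; omega
      rw [pvN_short _ this]; ring

-- B's scan, list-level: H r l = runs of length ≥ 2 in l, with r elements of l.head's run already seen
def pvH : Int → List String → Int
  | r, [] => if r > 1 then 1 else 0
  | r, [_] => if r > 1 then 1 else 0
  | r, x :: y :: t =>
    if y = x then pvH (r + 1) (y :: t)
    else (if r > 1 then 1 else 0) + pvH 1 (y :: t)

theorem foldB_eq : ∀ (l : List String) (c r : Int),
    (let s := (l.zip (l.drop 1)).foldl pvStepB (c, r); s.1 + (if s.2 > 1 then 1 else 0))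
      = c + pvH r l
  | [], c, r => by simp [pvH]
  | [x], c, r => by simp [pvH]
  | x :: y :: t, c, r => by
    show (let s := ((x, y) :: (y :: t).zip ((y :: t).drop 1)).foldl pvStepB (c, r);
          s.1 + (if s.2 > 1 then 1 else 0)) = c + pvH r (x :: y :: t)
    simp only [List.foldl_cons]
    by_cases h : y = x
    · simp only [show pvStepB (c, r) (x, y) = (c, r + 1) by simp [pvStepB, h]]
      rw [foldB_eq (y :: t) c (r + 1)]
      simp [pvH, h]
    · simp only [show pvStepB (c, r) (x, y) = (c + (if r > 1 then 1 else 0), 1) by simp [pvStepB, h]]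
      rw [foldB_eq (y :: t) (c + (if r > 1 then 1 else 0)) 1]
      simp [pvH, h]; ring

theorem pvH_cons2 (r : Int) (x y : String) (t : List String) :
    pvH r (x :: y :: t) =
      if y = x then pvH (r + 1) (y :: t) else (if r > 1 then 1 else 0) + pvH 1 (y :: t) := by
  rw [pvH]

theorem pvH_run : ∀ (t : List String) (y : String) (r : Int), 1 < r →
    pvH r (y :: t) = 1 + pvH 1 (t.dropWhile (· = y))
  | [], y, r, hr => by simp [pvH, hr]
  | z :: t', y, r, hr => by
    by_cases h : z = y
    · subst h
      rw [show pvH r (z :: z :: t') = pvH (r + 1) (z :: t') by simp [pvH]]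
      rw [pvH_run t' z (r + 1) (by omega)]
      simp [List.dropWhile]
    · rw [show pvH r (y :: z :: t') = (if r > 1 then 1 else 0) + pvH 1 (z :: t') by
        simp [pvH, h]]
      simp [List.dropWhile, h, hr]

theorem pvN_eq_pvH : ∀ (l : List String), pvN l = pvH 1 l
  | [] => by simp [pvN, pvH]
  | [x] => by simp [pvN, pvH]
  | x :: y :: t => by
    by_cases h : x = y
    · rw [pvN_cons2, if_pos h]
      rw [show pvSkip (x :: y :: t) = t.dropWhile (· = y) by
        subst h; rw [show pvSkip (x :: x :: t) = pvSkip (x :: t) by simp [pvSkip]];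
        exact pvSkip_cons t x]
      rw [pvH_cons2, if_pos h.symm]
      rw [pvH_run t y (1 + 1) (by omega)]
      rw [pvN_eq_pvH (t.dropWhile (· = y))]
    · rw [pvN_cons2, if_neg h]
      rw [pvH_cons2, if_neg (Ne.symm h)]
      rw [pvN_eq_pvH (y :: t)]
      simp
termination_by l => l.length
decreasing_by
  · have := List.length_dropWhile_le (p := (· = y)) (l := t)
    simp only [List.length_cons]; omega
  · simp

-- ===== VERDICT (by name: the statement is the Claim_ definition above) =====
theorem count_adjacent_pairs_spec : Claim_equal_count_adjacent_pairs := by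
  intro st _
  unfold Spec_count_adjacent_pairs count_adjacent_pairs count_adjacent_pairs_alt
  generalize PySem.Str.split₀ (PySem.Str.lower st) = w
  have hb := foldB_eq w 0 1
  simp only [List.drop_one] at hb
  simp only [PySem.List.slice_from_one]
  rw [pvLoop_eq w w.length 0 0 (by omega), List.drop_zero, pvN_eq_pvH, ← hb]
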